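-- pv_equiv track=rewrite | github.com/dapper91/stepic-courses | mail.ru algorithms/task1-2.py | find_max_pair
-- ===== SOURCE A (Python) =====
-- def find_max_pair(A, B):
-- 	partial_max	= []
-- 	max_val, max_ind = A[0], 0
--
-- 	for ind, val in enumerate(A):
-- 		max_val, max_ind = max((max_val, max_ind), (val, ind), key = lambda pair: pair[0])
-- 		partial_max.append((max_val, max_ind))
--
-- 	max_sum, i, j = partial_max[0][0] + B[0], 0, 0
-- 	for b_ind, ((a, a_ind), b) in enumerate(zip(partial_max, B)):
-- 		max_sum, i, j = max((max_sum, i, j), (a+b, a_ind, b_ind), key = lambda triplet: triplet[0])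
--
-- 	return i, j
-- ===== SOURCE B (Python) =====
-- def find_max_pair(A, B):
-- 	best_a, best_ai = A[0], 0
-- 	best_sum, i, j = A[0] + B[0], 0, 0
-- 	for ind, (a, b) in enumerate(zip(A, B)):
-- 		if a > best_a:
-- 			best_a, best_ai = a, ind
-- 		if best_a + b > best_sum:
-- 			best_sum, i, j = best_a + b, best_ai, ind
-- 	return i, j
-- ===== Notes on version B (the rewrite author's own statement) =====
-- stated objective: faster
-- what changed: Fuses A's two passes (build a prefix-max list of A, then scan it zipped with B) into one loop over zip(A,B) carrying a scalar running maximum, never materialising the prefix_max list.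
import Mathlib
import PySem

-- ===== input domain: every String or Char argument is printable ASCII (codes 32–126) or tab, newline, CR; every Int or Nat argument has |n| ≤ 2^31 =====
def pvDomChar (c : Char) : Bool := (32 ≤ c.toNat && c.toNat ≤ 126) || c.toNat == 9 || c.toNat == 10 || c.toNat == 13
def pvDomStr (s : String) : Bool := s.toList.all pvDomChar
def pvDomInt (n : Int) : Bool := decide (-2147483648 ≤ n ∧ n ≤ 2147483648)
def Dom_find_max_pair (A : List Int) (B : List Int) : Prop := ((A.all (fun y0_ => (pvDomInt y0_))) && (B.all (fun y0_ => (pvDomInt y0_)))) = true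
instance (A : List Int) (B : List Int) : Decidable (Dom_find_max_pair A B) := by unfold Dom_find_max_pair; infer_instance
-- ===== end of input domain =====

-- B fuses A's two passes (prefix-max list of A, then scan of it zipped with B) into one
-- loop over zip(A,B) carrying a scalar running maximum; same return value, no prefix_max list.


-- ===== PORT A =====
-- Literal port of A. `max(p, q, key=fst)` returns q exactly when q's key is strictly
-- greater (Python's max keeps the first argument on ties), ported as an `if _ > _`.
-- A[0]/B[0] raise IndexError on empty input; those inputs are outside Pre_ and the
-- port returns (0, 0) there.
def find_max_pair (A : List Int) (B : List Int) : Int × Int :=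
  match A, B with
  | a0 :: _, b0 :: _ =>
    let first := (PySem.List.enumerate A).foldl
      (fun (st : List (Int × Int) × Int × Int) (p : Int × Int) =>
        let mv' := if p.2 > st.2.1 then p.2 else st.2.1
        let mi' := if p.2 > st.2.1 then p.1 else st.2.2
        (st.1 ++ [(mv', mi')], mv', mi')) ([], a0, 0)
    let pm := first.1
    let init : Int × Int × Int := ((pm.headD (0, 0)).1 + b0, 0, 0)
    let second := (PySem.List.enumerate (pm.zip B)).foldl
      (fun (st : Int × Int × Int) (p : Int × ((Int × Int) × Int)) =>
        if p.2.1.1 + p.2.2 > st.1 then (p.2.1.1 + p.2.2, p.2.1.2, p.1) else st)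
      init
    (second.2.1, second.2.2)
  | _, _ => (0, 0)

-- ===== PORT B =====
-- Literal port of Source B: one fold over enumerate(zip(A,B)), state = (best_a, best_ai, best_sum, i, j).
def find_max_pair_alt (A : List Int) (B : List Int) : Int × Int :=
  if A.isEmpty || B.isEmpty then (0, 0)  -- A[0]/B[0] would raise: outside Pre_
  else
    let a0 := A.headD 0
    let b0 := B.headD 0
    let st := (PySem.List.enumerate (A.zip B)).foldl
      (fun (st : (Int × Int) × Int × Int × Int) (p : Int × Int × Int) =>
        let am := if p.2.1 > st.1.1 then (p.2.1, p.1) else st.1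
        if am.1 + p.2.2 > st.2.1 then (am, am.1 + p.2.2, am.2, p.1)
        else (am, st.2))
      ((a0, 0), a0 + b0, 0, 0)
    (st.2.2.1, st.2.2.2)

-- ===== PRECONDITION & SPEC =====
-- A raises IndexError (A[0]/B[0]) when either list is empty; exactly those inputs are excluded.
def Pre_find_max_pair (A : List Int) (B : List Int) : Prop := A ≠ [] ∧ B ≠ []
instance (A : List Int) (B : List Int) : Decidable (Pre_find_max_pair A B) := by unfold Pre_find_max_pair; infer_instance
def pvWitness_find_max_pair : List Int × List Int := ([3, 1, 5, 2], [2, 9, 1, 1])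

def Spec_find_max_pair (A : List Int) (B : List Int) (out : Int × Int) : Prop := out = find_max_pair_alt A B
instance (A : List Int) (B : List Int) (out : Int × Int) : Decidable (Spec_find_max_pair A B out) := by unfold Spec_find_max_pair; infer_instance

-- ===== CLAIM (what is proved, stated in full; the proofs are below) =====
def Claim_equal_find_max_pair : Prop := ∀ (A : List Int) (B : List Int), Dom_find_max_pair A B → Pre_find_max_pair A B → Spec_find_max_pair A B (find_max_pair A B)

-- ===== LEMMAS AND PROOFS =====

-- The prefix-max list A's first loop builds, as a structural recursion.
def pmAux (mv mi : Int) : List (Int × Int) → List (Int × Int)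
  | [] => []
  | p :: t =>
    let mv' := if p.2 > mv then p.2 else mv
    let mi' := if p.2 > mv then p.1 else mi
    (mv', mi') :: pmAux mv' mi' t

-- Common functional core both final scans compute.
def goA : List (Int × Int) → Int → Int → Int → Int × Int × Int → Int × Int × Int
  | [], _, _, _, s => s
  | (a, b) :: t, n, mv, mi, s =>
    let mv' := if a > mv then a else mv
    let mi' := if a > mv then n else mi
    goA t (n + 1) mv' mi' (if mv' + b > s.1 then (mv' + b, mi', n) else s)

theorem fold1_fst (l : List (Int × Int)) : ∀ (acc : List (Int × Int)) (mv mi : Int),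
    ((l.foldl
      (fun (st : List (Int × Int) × Int × Int) (p : Int × Int) =>
        let mv' := if p.2 > st.2.1 then p.2 else st.2.1
        let mi' := if p.2 > st.2.1 then p.1 else st.2.2
        (st.1 ++ [(mv', mi')], mv', mi')) (acc, mv, mi)).1) = acc ++ pmAux mv mi l := by
  induction l with
  | nil => intro acc mv mi; simp [pmAux]
  | cons p t ih =>
    intro acc mv mi
    simp only [List.foldl_cons, pmAux, ih]
    simp

theorem foldA_eq_goA (Al : List Int) : ∀ (Bl : List Int) (n mv mi : Int) (s : Int × Int × Int),
    ((PySem.List.enumerate ((pmAux mv mi (PySem.List.enumerate Al n)).zip Bl) n).foldl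
      (fun (st : Int × Int × Int) (p : Int × ((Int × Int) × Int)) =>
        if p.2.1.1 + p.2.2 > st.1 then (p.2.1.1 + p.2.2, p.2.1.2, p.1) else st) s)
    = goA (Al.zip Bl) n mv mi s := by
  induction Al with
  | nil => intro Bl n mv mi s; simp [PySem.List.enumerate_nil, pmAux, goA]
  | cons a t ih =>
    intro Bl n mv mi s
    cases Bl with
    | nil => simp [PySem.List.enumerate_nil, pmAux, goA, PySem.List.enumerate_cons]
    | cons b u =>
      simp only [PySem.List.enumerate_cons, pmAux, List.zip_cons_cons, List.foldl_cons, goA, ih]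

theorem foldB_eq_goA (l : List (Int × Int)) : ∀ (n mv mi : Int) (s : Int × Int × Int),
    (((PySem.List.enumerate l n).foldl
      (fun (st : (Int × Int) × Int × Int × Int) (p : Int × Int × Int) =>
        let am := if p.2.1 > st.1.1 then (p.2.1, p.1) else st.1
        if am.1 + p.2.2 > st.2.1 then (am, am.1 + p.2.2, am.2, p.1)
        else (am, st.2)) ((mv, mi), s)).2) = goA l n mv mi s := by
  induction l with
  | nil => intro n mv mi s; simp [PySem.List.enumerate_nil, goA]
  | cons p t ih =>
    intro n mv mi s
    obtain ⟨a, b⟩ := p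
    simp only [PySem.List.enumerate_cons, List.foldl_cons, goA]
    by_cases h : a > mv
    · by_cases h2 : a + b > s.1 <;> simp [h, h2, ih]
    · by_cases h2 : mv + b > s.1 <;> simp [h, h2, ih]

-- ===== VERDICT (by name: the statement is the Claim_ definition above) =====
theorem find_max_pair_spec : Claim_equal_find_max_pair := by
  intro A B _ hpre
  obtain ⟨hA, hB⟩ := hpre
  cases A with
  | nil => exact absurd rfl hA
  | cons a0 At =>
  cases B with
  | nil => exact absurd rfl hB
  | cons b0 Bt =>
  show find_max_pair (a0 :: At) (b0 :: Bt) = find_max_pair_alt (a0 :: At) (b0 :: Bt)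
  unfold find_max_pair find_max_pair_alt
  simp only [fold1_fst, List.nil_append, foldB_eq_goA]
  have hpm : pmAux a0 0 (PySem.List.enumerate (a0 :: At) 0)
      = (a0, 0) :: pmAux a0 0 (PySem.List.enumerate At 1) := by
    simp [PySem.List.enumerate_cons, pmAux]
  rw [hpm]
  have := foldA_eq_goA (a0 :: At) (b0 :: Bt) 0 a0 0 (a0 + b0, 0, 0)
  rw [show pmAux a0 0 (PySem.List.enumerate (a0 :: At) 0)
      = (a0, 0) :: pmAux a0 0 (PySem.List.enumerate At 1) from hpm] at this
  simp only [List.headD_cons]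
  rw [this]
  simp
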